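-- pv_equiv track=rewrite | github.com/ursakumeljfaks/Prakticna-matematika | 1.letnik/programiranje1/izpiti/izpit_5.py | sledilnik
-- ===== SOURCE A (Python) =====
-- def sledilnik(dnevi):
--     zaprti = 0
--     tabela_zaprtih = []
--     for i in range(len(dnevi)-1):
--         zaprt1 = dnevi[i][0]
--         odprt1 = dnevi[i][1]
--         zaprt2 = dnevi[i+1][0]
--         for posebi in zaprt1:
--             zaprti += 1
--             for posebi2 in odprt1:
--                 for posebi3 in zaprt2:
--                     if posebi3 == posebi2:
--                         zaprti += 1
--                     zaprti += 1
--     return zaprti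
-- ===== SOURCE B (Python) =====
-- def sledilnik(dnevi):
--     total = 0
--     for (z1, o1), (z2, _) in zip(dnevi, dnevi[1:]):
--         cnt = {}
--         for y in z2:
--             cnt[y] = cnt.get(y, 0) + 1
--         matches = sum(cnt.get(x, 0) for x in o1)
--         total += len(z1) * (1 + len(o1) * len(z2) + matches)
--     return total
-- ===== Notes on version B (the rewrite author's own statement) =====
-- stated objective: faster
-- what changed: Replaces the triple nested loop per day-pair with a closed-form count: a dict counter of the next day's first list turns the O(|z1|*|o1|*|z2|) scan into len(z1)*(1+len(o1)*len(z2)+matches) computed in linear time per day-pair.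
import Mathlib
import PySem

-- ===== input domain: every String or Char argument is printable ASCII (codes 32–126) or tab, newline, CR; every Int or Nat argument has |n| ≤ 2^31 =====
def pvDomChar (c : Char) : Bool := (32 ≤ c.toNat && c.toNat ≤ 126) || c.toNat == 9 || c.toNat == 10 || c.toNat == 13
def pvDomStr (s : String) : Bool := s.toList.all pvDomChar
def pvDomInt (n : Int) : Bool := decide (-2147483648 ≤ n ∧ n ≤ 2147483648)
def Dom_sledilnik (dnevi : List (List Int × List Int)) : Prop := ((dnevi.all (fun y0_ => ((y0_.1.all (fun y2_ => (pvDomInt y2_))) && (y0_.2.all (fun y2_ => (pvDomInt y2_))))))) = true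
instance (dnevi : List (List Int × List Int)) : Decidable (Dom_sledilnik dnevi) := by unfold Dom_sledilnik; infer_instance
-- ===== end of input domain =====

-- B replaces the triple nested loop per consecutive-day pair with a counter dict and a
-- closed-form product; asymptotically faster.

-- ===== PORT A =====
def sledilnik (dnevi : List (List Int × List Int)) : Int :=
  (PySem.List.pyRange 0 ((dnevi.length : Int) - 1) 1).foldl (fun zaprti i =>
    let zaprt1 := (PySem.List.pyGetD dnevi i ([], [])).1
    let odprt1 := (PySem.List.pyGetD dnevi i ([], [])).2
    let zaprt2 := (PySem.List.pyGetD dnevi (i + 1) ([], [])).1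
    zaprt1.foldl (fun z _ =>
      odprt1.foldl (fun z2 posebi2 =>
        zaprt2.foldl (fun z3 posebi3 =>
          (if posebi3 == posebi2 then z3 + 1 else z3) + 1) z2) (z + 1)) zaprti) 0

-- ===== PORT B =====
def sledilnik_alt (dnevi : List (List Int × List Int)) : Int :=
  (dnevi.zip dnevi.tail).foldl (fun total p =>
    let z1 := p.1.1
    let o1 := p.1.2
    let z2 := p.2.1
    let cnt := z2.foldl (fun d y => d.insert y (d.getD y 0 + 1)) (PySem.Dict.empty : PySem.Dict Int Int)
    let m := (o1.map (fun x => cnt.getD x 0)).sum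
    total + (z1.length : Int) * (1 + (o1.length : Int) * (z2.length : Int) + m)) 0

-- ===== PRECONDITION & SPEC =====
def Spec_sledilnik (dnevi : List (List Int × List Int)) (out : Int) : Prop := out = sledilnik_alt dnevi
instance (dnevi : List (List Int × List Int)) (out : Int) : Decidable (Spec_sledilnik dnevi out) := by unfold Spec_sledilnik; infer_instance

-- ===== CLAIM (what is proved, stated in full; the proofs are below) =====
def Claim_equal_sledilnik : Prop := ∀ (dnevi : List (List Int × List Int)), Dom_sledilnik dnevi → Spec_sledilnik dnevi (sledilnik dnevi)

-- ===== LEMMAS AND PROOFS =====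

-- the common per-day-pair contribution
def dayStep (acc : Int) (p : (List Int × List Int) × (List Int × List Int)) : Int :=
  acc + (p.1.1.length : Int) * (1 + (p.1.2.length : Int) * (p.2.1.length : Int)
        + (p.1.2.map (fun x => (p.2.1.count x : Int))).sum)

lemma alt_eq (dnevi : List (List Int × List Int)) :
    sledilnik_alt dnevi = (dnevi.zip dnevi.tail).foldl dayStep 0 := by
  unfold sledilnik_alt dayStep
  congr 1
  funext total p
  simp [PySem.Dict.getD_foldl_insert_add_one]

lemma inner_loop (z2 : List Int) (p2 a : Int) :
    z2.foldl (fun z3 p3 => (if p3 == p2 then z3 + 1 else z3) + 1) a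
      = a + (z2.length : Int) + (z2.count p2 : Int) := by
  induction z2 generalizing a with
  | nil => simp
  | cons h t ih =>
    rw [List.foldl_cons, ih]
    by_cases hh : h = p2 <;> simp [hh] <;> ring

lemma mid_loop (o1 z2 : List Int) (a : Int) :
    o1.foldl (fun z p2 => z2.foldl (fun z3 p3 => (if p3 == p2 then z3 + 1 else z3) + 1) z) a
      = a + (o1.length : Int) * (z2.length : Int) + (o1.map (fun x => (z2.count x : Int))).sum := by
  induction o1 generalizing a with
  | nil => simp
  | cons h t ih =>
    rw [List.foldl_cons, ih, inner_loop]
    simp [List.map_cons]; ring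

lemma outer_loop (z1 o1 z2 : List Int) (a : Int) :
    z1.foldl (fun z _ =>
        o1.foldl (fun z2' p2 => z2.foldl (fun z3 p3 => (if p3 == p2 then z3 + 1 else z3) + 1) z2') (z + 1)) a
      = a + (z1.length : Int) * (1 + (o1.length : Int) * (z2.length : Int)
            + (o1.map (fun x => (z2.count x : Int))).sum) := by
  induction z1 generalizing a with
  | nil => simp
  | cons h t ih =>
    rw [List.foldl_cons, ih, mid_loop]
    simp only [List.length_cons]; push_cast; ring

lemma pairs_eq (xs : List (List Int × List Int)) :
    (PySem.List.pyRange 0 ((xs.length : Int) - 1) 1).map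
        (fun i => (PySem.List.pyGetD xs i (([], []) : List Int × List Int),
                   PySem.List.pyGetD xs (i + 1) (([], []) : List Int × List Int)))
      = xs.zip xs.tail := by
  rw [PySem.List.pyRange_one]
  apply List.ext_getElem
  · simp only [List.length_map, List.length_range, List.length_zip, List.length_tail]
    omega
  · intro k h1 h2
    simp only [List.length_map, List.length_range] at h1
    have hk1 : k + 1 < xs.length := by omega
    have hk0 : k < xs.length := by omega
    simp only [List.getElem_map, List.getElem_range, List.getElem_zip]
    have e1 : (0 : Int) + (k : Int) = ((k : Nat) : Int) := by ring
    rw [e1]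
    have g1 : PySem.List.pyGetD xs ((k : Nat) : Int) (([], []) : List Int × List Int) = xs[k] := by
      rw [PySem.List.pyGetD_eq_getElem xs ([], []) (Int.natCast_nonneg k) (by exact_mod_cast hk0)]
      simp
    have g2 : PySem.List.pyGetD xs (((k : Nat) : Int) + 1) (([], []) : List Int × List Int)
        = xs[k + 1] := by
      have e2 : ((k : Nat) : Int) + 1 = ((k + 1 : Nat) : Int) := by push_cast; ring
      rw [e2, PySem.List.pyGetD_eq_getElem xs ([], []) (Int.natCast_nonneg (k+1)) (by exact_mod_cast hk1)]
      simp
    have ht := List.getElem_tail (l := xs) (i := k) (by simp [List.length_tail]; omega)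
    simp [g1, g2, ht]

lemma a_eq (dnevi : List (List Int × List Int)) :
    sledilnik dnevi = (dnevi.zip dnevi.tail).foldl dayStep 0 := by
  unfold sledilnik
  rw [show (fun (zaprti : Int) (i : Int) =>
        let zaprt1 := (PySem.List.pyGetD dnevi i ([], [])).1
        let odprt1 := (PySem.List.pyGetD dnevi i ([], [])).2
        let zaprt2 := (PySem.List.pyGetD dnevi (i + 1) ([], [])).1
        zaprt1.foldl (fun z _ =>
          odprt1.foldl (fun z2 posebi2 =>
            zaprt2.foldl (fun z3 posebi3 =>
              (if posebi3 == posebi2 then z3 + 1 else z3) + 1) z2) (z + 1)) zaprti)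
      = (fun (zaprti : Int) (i : Int) =>
          dayStep zaprti (PySem.List.pyGetD dnevi i (([], []) : List Int × List Int),
                          PySem.List.pyGetD dnevi (i + 1) (([], []) : List Int × List Int)))
      from by
        funext zaprti i
        simp only [outer_loop, dayStep]]
  rw [← List.foldl_map, pairs_eq]

-- ===== VERDICT (by name: the statement is the Claim_ definition above) =====
theorem sledilnik_spec : Claim_equal_sledilnik := by
  intro dnevi _
  unfold Spec_sledilnik
  rw [a_eq, alt_eq]
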